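-- pv_equiv track=rewrite | github.com/python/cpython | Tools/clinic/clinic/clanguage.py | quoted_for_c_string
-- ===== SOURCE A (Python) =====
-- def quoted_for_c_string(s: str) -> str:
--     for old, new in (
--         ('\\', '\\\\'), # must be first!
--         ('"', '\\"'),
--         ("'", "\\'"),
--         ):
--         s = s.replace(old, new)
--     return s
-- ===== SOURCE B (Python) =====
-- def quoted_for_c_string(s: str) -> str:
--     table = {'\\': '\\\\', '"': '\\"', "'": "\\'"}
--     out = []
--     for ch in s:
--         out.append(table.get(ch, ch))
--     return ''.join(out)
-- ===== Notes on version B (the rewrite author's own statement) =====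
-- stated objective: idiomatic
-- what changed: Replaces the three sequential whole-string replace passes with one single pass over the characters driven by an escape table, joining the pieces once.
import Mathlib
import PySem

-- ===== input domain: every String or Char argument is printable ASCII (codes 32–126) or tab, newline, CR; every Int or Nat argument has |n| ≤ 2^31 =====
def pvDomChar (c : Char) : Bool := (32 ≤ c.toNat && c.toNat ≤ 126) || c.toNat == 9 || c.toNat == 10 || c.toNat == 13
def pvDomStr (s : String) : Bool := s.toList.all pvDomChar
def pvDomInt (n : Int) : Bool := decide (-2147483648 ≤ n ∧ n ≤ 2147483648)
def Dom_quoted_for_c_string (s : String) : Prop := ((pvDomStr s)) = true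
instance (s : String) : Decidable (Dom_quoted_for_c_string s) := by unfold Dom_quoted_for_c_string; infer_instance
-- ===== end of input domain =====

-- B changes A's three sequential replace passes into one table-driven pass; objective: idiomatic.

-- ===== PORT A =====
-- A: s = s.replace('\\','\\\\'); s = s.replace('"','\\"'); s = s.replace("'","\\'")
def quoted_for_c_string (s : String) : String :=
  let s1 := PySem.Str.replace s "\\" "\\\\"
  let s2 := PySem.Str.replace s1 "\"" "\\\""
  PySem.Str.replace s2 "'" "\\'"

-- ===== PORT B =====
-- table.get(ch, ch)
def qfcEsc (c : Char) : List Char :=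
  if c = '\\' then ['\\', '\\']
  else if c = '"' then ['\\', '"']
  else if c = '\'' then ['\\', '\'']
  else [c]

def quoted_for_c_string_alt (s : String) : String :=
  String.ofList ((s.toList.map qfcEsc).flatten)

-- ===== PRECONDITION & SPEC =====
def Spec_quoted_for_c_string (s : String) (out : String) : Prop := out = quoted_for_c_string_alt s
instance (s : String) (out : String) : Decidable (Spec_quoted_for_c_string s out) := by unfold Spec_quoted_for_c_string; infer_instance

-- ===== CLAIM (what is proved, stated in full; the proofs are below) =====
def Claim_equal_quoted_for_c_string : Prop := ∀ (s : String), Dom_quoted_for_c_string s → Spec_quoted_for_c_string s (quoted_for_c_string s)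

-- ===== LEMMAS AND PROOFS =====

-- single-character replacement, directly recursive
def qfcSub (o : Char) (new : List Char) : List Char → List Char
  | [] => []
  | c :: t => if c = o then new ++ qfcSub o new t else c :: qfcSub o new t

theorem qfc_go_single (o : Char) (new : List Char) :
    ∀ (l acc : List Char),
      PySem.Chars.replace.go [o] new l.length l acc = acc.reverse ++ qfcSub o new l := by
  intro l
  induction l with
  | nil => intro acc; simp [PySem.Chars.replace.go, qfcSub]
  | cons c t ih =>
    intro acc
    show PySem.Chars.replace.go [o] new (t.length + 1) (c :: t) acc = _
    rw [PySem.Chars.replace.go]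
    by_cases h : c = o
    · simp [List.isPrefixOf, h, ih, qfcSub]
    · have : (o == c) = false := by simp; exact fun e => h e.symm
      simp [List.isPrefixOf, this, ih, qfcSub, h]

theorem qfc_replace_single (o : Char) (new l : List Char) :
    PySem.Chars.replace l [o] new = qfcSub o new l := by
  rw [PySem.Chars.replace]
  simp [qfc_go_single]

theorem qfc_main (l : List Char) :
    qfcSub '\'' ['\\', '\'']
      (qfcSub '"' ['\\', '"']
        (qfcSub '\\' ['\\', '\\'] l)) = (l.map qfcEsc).flatten := by
  induction l with
  | nil => simp [qfcSub]
  | cons c t ih =>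
    by_cases h1 : c = '\\'
    · simp [qfcSub, h1, qfcEsc, ih]
    · by_cases h2 : c = '"'
      · simp [qfcSub, h2, qfcEsc, ih]
      · by_cases h3 : c = '\''
        · simp [qfcSub, h3, qfcEsc, ih]
        · simp [qfcSub, h1, h2, h3, qfcEsc, ih]

-- ===== VERDICT (by name: the statement is the Claim_ definition above) =====
theorem quoted_for_c_string_spec : Claim_equal_quoted_for_c_string := by
  intro s _
  show quoted_for_c_string s = quoted_for_c_string_alt s
  unfold quoted_for_c_string quoted_for_c_string_alt PySem.Str.replace
  simp only [String.toList_ofList]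
  have e1 : ("\\" : String).toList = ['\\'] := rfl
  have e2 : ("\\\\" : String).toList = ['\\', '\\'] := rfl
  have e3 : ("\"" : String).toList = ['"'] := rfl
  have e4 : ("\\\"" : String).toList = ['\\', '"'] := rfl
  have e5 : ("'" : String).toList = ['\''] := rfl
  have e6 : ("\\'" : String).toList = ['\\', '\''] := rfl
  rw [e1, e2, e3, e4, e5, e6, qfc_replace_single, qfc_replace_single, qfc_replace_single,
    qfc_main]
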